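-- pv_equiv track=rewrite | github.com/juyongc/Up-Algorithms | PROG_땅따먹기.py | solution
-- ===== SOURCE A (Python) =====
-- def solution(land):
--     answer = 0
--
--     row = len(land)
--     col = len(land[0])
--     # 이전값에서 가장 큰 값 더하기
--     for i in range(1,row):
--         for j in range(col):
--             land[i][j] += max(land[i-1][0:j] + land[i-1][j+1:])
--
--     answer = max(land[-1])
--     return answer
-- ===== SOURCE B (Python) =====
-- def solution(land):
--     # O(row*col): track the max, its first index, and the runner-up of the previous row.
--     prev = land[0]
--     for cur in land[1:]:
--         b1 = s1 = None
--         i1 = -1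
--         for idx, v in enumerate(prev):
--             if b1 is None or v > b1:
--                 s1, b1, i1 = b1, v, idx
--             elif s1 is None or v > s1:
--                 s1 = v
--         prev = [v + (s1 if j == i1 else b1) for j, v in enumerate(cur)]
--     return max(prev)
-- ===== Notes on version B (the rewrite author's own statement) =====
-- stated objective: faster
-- what changed: B replaces A's per-cell max over two slices of the previous row (O(col) work per cell) by a single scan per row that records the previous row's maximum, its first index and the runner-up, then adds runner-up at the argmax column and the maximum elsewhere; B also does not mutate the input grid.
-- outside the precondition, e.g. on solution([[1, 2], [3, 4, 50]]): A returns 50, B returns 52; on solution([]): A raises IndexError, B raises IndexError; on solution([[5], [6]]): A raises ValueError, B raises TypeError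
import Mathlib
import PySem

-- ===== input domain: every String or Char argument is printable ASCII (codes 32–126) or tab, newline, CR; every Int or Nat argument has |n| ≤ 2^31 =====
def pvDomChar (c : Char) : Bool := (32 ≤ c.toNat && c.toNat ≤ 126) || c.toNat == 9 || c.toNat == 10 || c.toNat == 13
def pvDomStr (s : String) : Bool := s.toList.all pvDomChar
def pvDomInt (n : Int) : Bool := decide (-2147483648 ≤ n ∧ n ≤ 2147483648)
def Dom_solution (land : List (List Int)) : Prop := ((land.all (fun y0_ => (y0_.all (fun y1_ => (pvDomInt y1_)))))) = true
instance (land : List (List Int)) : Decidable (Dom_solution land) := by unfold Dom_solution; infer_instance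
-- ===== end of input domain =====

-- B replaces A's O(col) slice-max per cell by one top-two scan per row (asymptotically faster);
-- A mutates `land` in place, B does not — the equivalence proved here is about the return value only.

-- ===== PORT A =====
-- inner loop 'for j in range(col): land[i][j] += max(land[i-1][0:j] + land[i-1][j+1:])';
-- slices with the Nat index j are take/drop (exact); Python max raises ValueError on [] and
-- land[i][j] raises IndexError out of range — those inputs are excluded by Pre_ (getD is never
-- hit inside Pre_).
def stepRowA (col : Nat) (prev cur : List Int) : List Int :=
  (List.range col).foldl
    (fun c j => c.set j (c.getD j 0 + (PySem.List.max? (prev.take j ++ prev.drop (j + 1)) (fun y => y)).getD 0))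
    cur

-- outer loop 'for i in range(1,row)', carrying the already-updated previous row land[i-1]
def rowsA (col : Nat) : List Int → List (List Int) → List Int
  | prev, [] => prev
  | prev, cur :: rest => rowsA col (stepRowA col prev cur) rest

def solution (land : List (List Int)) : Int :=
  (PySem.List.max? (rowsA (land.headD []).length (land.headD []) (land.drop 1)) (fun y => y)).getD 0

-- ===== PORT B =====
-- 'b1 is None or v > b1' (Source B); None-state encoded as Option
def pyLtOpt : Option Int → Int → Bool
  | none, _ => true
  | some b, v => decide (b < v)

-- one enumerate step of Source B's top-two scan: state (b1, i1, s1)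
def stepTT (st : Option Int × Int × Option Int) (p : Int × Int) : Option Int × Int × Option Int :=
  if pyLtOpt st.1 p.2 then (some p.2, p.1, st.1)
  else if pyLtOpt st.2.2 p.2 then (st.1, st.2.1, some p.2)
  else st

-- one row of Source B: scan prev for (best, its first index, runner-up), then the comprehension;
-- 'v + None' would be a TypeError in Source B — only reachable outside Pre_, ported as getD 0
def stepRowB (prev cur : List Int) : List Int :=
  let st := (PySem.List.enumerate prev 0).foldl stepTT (none, -1, none)
  (PySem.List.enumerate cur 0).map (fun p => p.2 + (if p.1 = st.2.1 then st.2.2.getD 0 else st.1.getD 0))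

def rowsB : List Int → List (List Int) → List Int
  | prev, [] => prev
  | prev, cur :: rest => rowsB (stepRowB prev cur) rest

def solution_alt (land : List (List Int)) : Int :=
  (PySem.List.max? (rowsB (land.headD []) (land.drop 1)) (fun y => y)).getD 0

-- ===== PRECONDITION & SPEC =====
-- Pre_ excludes inputs where Python A raises (empty land / empty first row: IndexError; several
-- rows of a single column: max([]) ValueError; a later row shorter than the first: IndexError),
-- and non-rectangular grids with a later row LONGER than the first row, on which A returns a
-- value mixing updated cells with cells its loop never touched while B updates every cell.
def Pre_solution (land : List (List Int)) : Prop :=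
  land ≠ [] ∧ (land.headD []) ≠ [] ∧ (∀ r ∈ land, r.length = (land.headD []).length) ∧
    (land.length = 1 ∨ 2 ≤ (land.headD []).length)
instance (land : List (List Int)) : Decidable (Pre_solution land) := by unfold Pre_solution; infer_instance

def pvWitness_solution : List (List Int) := [[1, 2], [3, 4]]

def Spec_solution (land : List (List Int)) (out : Int) : Prop := out = solution_alt land
instance (land : List (List Int)) (out : Int) : Decidable (Spec_solution land out) := by unfold Spec_solution; infer_instance

-- ===== CLAIM (what is proved, stated in full; the proofs are below) =====
def Claim_equal_solution : Prop := ∀ (land : List (List Int)), Dom_solution land → Pre_solution land → Spec_solution land (solution land)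

-- ===== LEMMAS AND PROOFS =====

-- a value that is a member and an upper bound is THE value of max?
lemma max?_eq_of (l : List Int) (m : Int) (hm : m ∈ l) (hle : ∀ y ∈ l, y ≤ m) :
    PySem.List.max? l (fun y => y) = some m := by
  cases h : PySem.List.max? l (fun y => y) with
  | none => exact absurd ((PySem.List.max?_eq_none_iff l _).mp h) (by rintro rfl; exact (List.not_mem_nil hm))
  | some m' =>
    have h1 : m ≤ m' := PySem.List.max?_isMax h m hm
    have h2 : m' ≤ m := hle m' (PySem.List.max?_mem h)
    simp [le_antisymm h2 h1]

-- invariant of Source B's scan after having consumed `seen`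
def ScanInv (seen : List Int) (st : Option Int × Int × Option Int) : Prop :=
  if seen = [] then st = (none, -1, none)
  else ∃ (m : Int) (k : Nat), st.1 = some m ∧ st.2.1 = (k : Int) ∧ k < seen.length ∧ seen[k]? = some m ∧
    (∀ y ∈ seen, y ≤ m) ∧ (∀ y ∈ seen.take k, y < m) ∧
    st.2.2 = PySem.List.max? (seen.eraseIdx k) (fun y => y)

lemma max?_singleton (v : Int) : PySem.List.max? [v] (fun y => y) = some v :=
  max?_eq_of [v] v (by simp) (by simp)

lemma step_inv (seen : List Int) (st : Option Int × Int × Option Int) (v : Int)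
    (h : ScanInv seen st) : ScanInv (seen ++ [v]) (stepTT st ((seen.length : Int), v)) := by
  obtain ⟨b1, i1, s1⟩ := st
  by_cases hseen : seen = []
  · subst hseen
    rw [ScanInv, if_pos rfl] at h
    simp only [Prod.ext_iff] at h
    obtain ⟨rfl, rfl, rfl⟩ := h
    rw [ScanInv, if_neg (by simp)]
    refine ⟨v, 0, by simp [stepTT, pyLtOpt], by simp [stepTT, pyLtOpt], by simp, by simp,
      by simp, by simp, ?_⟩
    simp only [stepTT, pyLtOpt, if_pos]
    simpa using ((PySem.List.max?_eq_none_iff [] (fun y : Int => y)).mpr rfl).symm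
  · rw [ScanInv, if_neg hseen] at h
    obtain ⟨m, k, hb1, hi1, hk, hgk, hub, hlt, hs1⟩ := h
    simp only at hb1 hi1 hs1
    subst hb1; subst hi1; subst hs1
    rw [ScanInv, if_neg (by simp)]
    rw [stepTT]
    by_cases hmv : m < v
    · -- new maximum at index seen.length
      rw [if_pos (by simp [pyLtOpt, hmv])]
      refine ⟨v, seen.length, rfl, rfl, by simp, List.getElem?_concat_length, ?_, ?_, ?_⟩
      · intro y hy
        rcases List.mem_append.mp hy with hy | hy
        · exact le_of_lt (lt_of_le_of_lt (hub y hy) hmv)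
        · simp at hy; omega
      · intro y hy
        rw [List.take_left] at hy
        exact lt_of_le_of_lt (hub y hy) hmv
      · simp only
        rw [List.eraseIdx_append_of_length_le (le_refl _), Nat.sub_self]
        simpa using (max?_eq_of seen m (List.mem_of_getElem? hgk) hub).symm
    · -- v ≤ m : best unchanged
      rw [if_neg (by simp [pyLtOpt]; omega)]
      have hvm : v ≤ m := le_of_not_gt hmv
      have hmem_new : (seen ++ [v])[k]? = some m := by
        rw [List.getElem?_append_left hk]; exact hgk
      have hub_new : ∀ y ∈ seen ++ [v], y ≤ m := by
        intro y hy
        rcases List.mem_append.mp hy with hy | hy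
        · exact hub y hy
        · simp at hy; omega
      have hlt_new : ∀ y ∈ (seen ++ [v]).take k, y < m := by
        intro y hy
        rw [List.take_append_of_le_length (le_of_lt hk)] at hy
        exact hlt y hy
      have herase : (seen ++ [v]).eraseIdx k = seen.eraseIdx k ++ [v] :=
        List.eraseIdx_append_of_lt_length hk [v]
      cases hs : PySem.List.max? (seen.eraseIdx k) (fun y => y) with
      | none =>
        -- seen has a single element: runner-up was None, v moves in
        rw [if_pos (by simp [pyLtOpt])]
        have hnil : seen.eraseIdx k = [] := (PySem.List.max?_eq_none_iff _ _).mp hs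
        refine ⟨m, k, rfl, rfl, by simp; omega, hmem_new, hub_new, hlt_new, ?_⟩
        simp only
        rw [herase, hnil, List.nil_append, max?_singleton]
      | some ss =>
        have hss_mem : ss ∈ seen.eraseIdx k := PySem.List.max?_mem hs
        have hss_ub : ∀ y ∈ seen.eraseIdx k, y ≤ ss := PySem.List.max?_isMax hs
        by_cases hsv : ss < v
        · rw [if_pos (by simp [pyLtOpt, hsv])]
          refine ⟨m, k, rfl, rfl, by simp; omega, hmem_new, hub_new, hlt_new, ?_⟩
          simp only
          rw [herase]
          refine (max?_eq_of _ v (by simp) ?_).symm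
          intro y hy
          rcases List.mem_append.mp hy with hy | hy
          · exact le_of_lt (lt_of_le_of_lt (hss_ub y hy) hsv)
          · simp at hy; omega
        · rw [if_neg (by simp [pyLtOpt]; omega)]
          refine ⟨m, k, rfl, rfl, by simp; omega, hmem_new, hub_new, hlt_new, ?_⟩
          simp only
          rw [herase]
          refine (max?_eq_of _ ss (List.mem_append_left _ hss_mem) ?_).symm
          intro y hy
          rcases List.mem_append.mp hy with hy | hy
          · exact hss_ub y hy
          · simp at hy; omega

lemma fold_inv (l : List Int) : ∀ (seen : List Int) (st : Option Int × Int × Option Int),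
    ScanInv seen st →
    ScanInv (seen ++ l) ((PySem.List.enumerate l (seen.length : Int)).foldl stepTT st) := by
  induction l with
  | nil => intro seen st h; simpa [PySem.List.enumerate]
  | cons v t ih =>
    intro seen st h
    rw [PySem.List.enumerate_cons, List.foldl_cons]
    have h2 := step_inv seen st v h
    have := ih (seen ++ [v]) _ h2
    simpa [List.append_assoc] using this

-- A's slice-max at column j, read off from the invariant state
lemma removed_max_eq (prev : List Int) (st : Option Int × Int × Option Int)
    (hne : prev ≠ []) (hInv : ScanInv prev st) (j : Nat) :
    (PySem.List.max? (prev.take j ++ prev.drop (j + 1)) (fun y => y)).getD 0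
      = if (j : Int) = st.2.1 then st.2.2.getD 0 else st.1.getD 0 := by
  rw [ScanInv, if_neg hne] at hInv
  obtain ⟨m, k, hb1, hi1, hk, hgk, hub, hlt, hs1⟩ := hInv
  rw [← List.eraseIdx_eq_take_drop_succ, hi1, hb1, hs1]
  by_cases hjk : j = k
  · subst hjk; rw [if_pos rfl]
  · rw [if_neg (by exact_mod_cast hjk)]
    have hmem : m ∈ prev.eraseIdx j := by
      rw [List.eraseIdx_eq_take_drop_succ]
      rcases Nat.lt_or_ge k j with hkj | hkj
      · exact List.mem_append_left _ (List.mem_of_getElem?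
          (by rw [List.getElem?_take, if_pos hkj]; exact hgk))
      · have hkj' : j + 1 ≤ k := by omega
        exact List.mem_append_right _ (List.mem_of_getElem?
          (by rw [List.getElem?_drop, Nat.add_sub_cancel' hkj']; exact hgk))
    rw [max?_eq_of _ m hmem
      (fun y hy => hub y ((List.eraseIdx_sublist prev j).mem hy))]

-- A's in-place row update as a mapIdx
lemma foldl_set_range (f : Nat → Int) : ∀ (n : Nat) (c : List Int),
    (List.range n).foldl (fun c j => c.set j (c.getD j 0 + f j)) c
      = c.mapIdx (fun j v => if j < n then v + f j else v) := by
  intro n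
  induction n with
  | zero =>
    intro c
    apply List.ext_getElem (by simp)
    intro i hi1 hi2
    simp [List.getElem_mapIdx]
  | succ n ih =>
    intro c
    rw [List.range_succ, List.foldl_append, ih, List.foldl_cons, List.foldl_nil]
    by_cases hn : n < c.length
    · apply List.ext_getElem (by simp)
      intro i hi1 hi2
      have hci : i < c.length := by simpa using hi2
      simp only [List.getElem_set, List.getElem_mapIdx,
        List.getD_eq_getElem?_getD, List.getElem?_mapIdx, List.getElem?_eq_getElem hn]
      by_cases hin : n = i
      · subst hin; simp
      · rw [if_neg hin]
        by_cases h1 : i < n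
        · rw [if_pos h1, if_pos (by omega)]
        · rw [if_neg h1, if_neg (by omega)]
    · rw [List.set_eq_of_length_le (by simpa using Nat.le_of_not_lt hn)]
      apply List.ext_getElem (by simp)
      intro i hi1 hi2
      have hci : i < c.length := by simpa using hi2
      simp only [List.getElem_mapIdx]
      rw [if_pos (by omega), if_pos (by omega)]

lemma stepRow_eq (prev cur : List Int) (hne : prev ≠ []) (hc : cur.length = prev.length) :
    stepRowA prev.length prev cur = stepRowB prev cur := by
  have hInv : ScanInv prev ((PySem.List.enumerate prev 0).foldl stepTT (none, -1, none)) := by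
    simpa using fold_inv prev [] (none, -1, none) (by rw [ScanInv, if_pos rfl])
  unfold stepRowA stepRowB
  rw [foldl_set_range]
  simp only [PySem.List.enumerate_eq_zipIdx_map, List.map_map, List.mapIdx_eq_zipIdx_map, zero_add]
  simp only [PySem.List.enumerate_eq_zipIdx_map, zero_add] at hInv
  apply List.map_congr_left
  intro p hp
  obtain ⟨v, i⟩ := p
  have hbound : i < cur.length := by simpa using (List.mem_zipIdx hp).2.1
  simp only [Function.comp]
  rw [if_pos (hc ▸ hbound)]
  rw [removed_max_eq prev _ hne hInv i]

lemma length_stepRowB (prev cur : List Int) : (stepRowB prev cur).length = cur.length := by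
  simp [stepRowB, PySem.List.enumerate_eq_zipIdx_map]

lemma rows_eq (col : Nat) : ∀ (rest : List (List Int)) (prev : List Int),
    prev.length = col → prev ≠ [] → (∀ r ∈ rest, r.length = col) →
    rowsA col prev rest = rowsB prev rest := by
  intro rest
  induction rest with
  | nil => intro prev _ _ _; rfl
  | cons cur rest ih =>
    intro prev hlen hne hrest
    subst hlen
    have hc : cur.length = prev.length := by
      exact hrest cur (by simp)
    have hcol : 0 < prev.length := List.length_pos_of_ne_nil hne
    show rowsA prev.length (stepRowA prev.length prev cur) rest = rowsB (stepRowB prev cur) rest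
    rw [stepRow_eq prev cur hne hc]
    exact ih (stepRowB prev cur) (by rw [length_stepRowB, hc])
      (by apply List.ne_nil_of_length_pos; rw [length_stepRowB, hc]; exact hcol)
      (fun r hr => hrest r (by simp [hr]))

-- ===== VERDICT (by name: the statement is the Claim_ definition above) =====
theorem solution_spec : Claim_equal_solution := by
  unfold Claim_equal_solution Spec_solution
  intro land _ hpre
  obtain ⟨hne, hhead, hlenr, _⟩ := hpre
  cases land with
  | nil => exact absurd rfl hne
  | cons h t =>
    have hh : h ≠ [] := by simpa using hhead
    have hrt : ∀ r ∈ t, r.length = h.length := fun r hrm => by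
      simpa using hlenr r (List.mem_cons_of_mem _ hrm)
    unfold solution solution_alt
    simp only [List.headD_cons, List.drop_succ_cons, List.drop_zero]
    rw [rows_eq h.length t h rfl hh hrt]
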